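-- pv_equiv track=rewrite | github.com/laibao-ai-token/tradecat | scripts/tradecat_get_quotes.py | _split_symbols
-- ===== SOURCE A (Python) =====
-- from typing import Any, Callable, Optional, Sequence
--
-- def _split_symbols(chunks: Sequence[str]) -> list[str]:
--     out: list[str] = []
--     for chunk in chunks:
--         for part in str(chunk).split(","):
--             symbol = part.strip()
--             if symbol:
--                 out.append(symbol)
--     return out
-- ===== SOURCE B (Python) =====
-- def _split_symbols(chunks):
--     # Single character-level state machine: no split()/strip() calls.
--     # token holds the current symbol's chars (leading whitespace never enters);
--     # pend buffers whitespace seen after a token char, committed only when a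
--     # further non-whitespace char arrives (so trailing whitespace is dropped).
--     out = []
--     for chunk in chunks:
--         token = []
--         pend = []
--         for ch in str(chunk):
--             if ch == ",":
--                 if token:
--                     out.append("".join(token))
--                 token = []
--                 pend = []
--             elif ch.isspace():
--                 if token:
--                     pend.append(ch)
--             else:
--                 token.extend(pend)
--                 pend = []
--                 token.append(ch)
--         if token:
--             out.append("".join(token))
--     return out
-- ===== Notes on version B (the rewrite author's own statement) =====
-- stated objective: alternative
-- what changed: Replaces A's split-then-strip pipeline with a single character-level state machine that builds each symbol incrementally (a pending-whitespace buffer drops trailing whitespace and a token-empty test drops leading whitespace), never calling split or strip.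
import Mathlib
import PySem

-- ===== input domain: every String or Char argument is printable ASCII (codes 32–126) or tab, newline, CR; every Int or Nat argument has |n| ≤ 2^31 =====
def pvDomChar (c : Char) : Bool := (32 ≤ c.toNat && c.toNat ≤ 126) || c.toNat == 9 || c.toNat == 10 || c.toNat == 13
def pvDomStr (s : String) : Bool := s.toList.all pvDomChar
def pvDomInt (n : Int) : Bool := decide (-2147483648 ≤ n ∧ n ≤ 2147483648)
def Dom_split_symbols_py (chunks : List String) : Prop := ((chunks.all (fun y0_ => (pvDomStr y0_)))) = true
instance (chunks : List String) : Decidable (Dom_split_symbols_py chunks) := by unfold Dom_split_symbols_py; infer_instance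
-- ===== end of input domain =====

-- B replaces A's split-then-strip pipeline by a single character-level state machine
-- (token + pending-whitespace buffer) that never calls split or strip (objective: alternative).

-- ===== PORT A =====
-- for chunk in chunks: for part in chunk.split(","): symbol = part.strip(); if symbol: out.append(symbol)
def split_symbols_py (chunks : List String) : List String :=
  chunks.foldl (fun out chunk =>
    ((PySem.Chars.splitOn chunk.toList ",".toList).map String.ofList).foldl (fun out part =>
      let symbol := PySem.Str.strip part
      if symbol ≠ "" then out ++ [symbol] else out) out) []

-- ===== PORT B =====
-- inner char loop of Source B: token = current symbol chars, pend = buffered whitespace;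
-- on ',' flush token; on whitespace buffer it (if a token is open); else commit pend ++ [ch].
def altChunk : List Char → List Char → List Char → List String → List String
  | [], token, _pend, out => if token ≠ [] then out ++ [String.ofList token] else out
  | ch :: rest, token, pend, out =>
    if ch = ',' then
      altChunk rest [] [] (if token ≠ [] then out ++ [String.ofList token] else out)
    else if PySem.Chars.isspace ch then
      altChunk rest token (if token ≠ [] then pend ++ [ch] else pend) out
    else
      altChunk rest (token ++ pend ++ [ch]) [] out

def split_symbols_py_alt (chunks : List String) : List String :=
  chunks.foldl (fun out chunk => altChunk chunk.toList [] [] out) []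

-- ===== PRECONDITION & SPEC =====
def Spec_split_symbols_py (chunks : List String) (out : List String) : Prop := out = split_symbols_py_alt chunks
instance (chunks : List String) (out : List String) : Decidable (Spec_split_symbols_py chunks out) := by unfold Spec_split_symbols_py; infer_instance

-- ===== CLAIM (what is proved, stated in full; the proofs are below) =====
def Claim_equal_split_symbols_py : Prop := ∀ (chunks : List String), Dom_split_symbols_py chunks → Spec_split_symbols_py chunks (split_symbols_py chunks)

-- ===== LEMMAS AND PROOFS =====

-- Reference shape of splitting a char list on ',' (used only in the proofs).
def pvParts : List Char → List Char → List (List Char)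
  | [], cur => [cur.reverse]
  | c :: rest, cur => if c = ',' then cur.reverse :: pvParts rest [] else pvParts rest (c :: cur)

theorem pv_go_eq_parts (l : List Char) : ∀ (fuel : Nat) (cur : List Char) (acc : List (List Char)),
    l.length ≤ fuel →
    PySem.Chars.splitOn.go [','] fuel l cur acc = acc.reverse ++ pvParts l cur := by
  induction l with
  | nil =>
    intro fuel cur acc _
    cases fuel <;> simp [PySem.Chars.splitOn.go, pvParts]
  | cons c rest ih =>
    intro fuel cur acc h
    cases fuel with
    | zero => simp at h
    | succ f =>
      by_cases hc : c = ','
      · subst hc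
        simp only [PySem.Chars.splitOn.go, List.isPrefixOf, beq_self_eq_true, Bool.true_and,
          if_true]
        rw [show List.drop [','].length (',' :: rest) = rest from rfl]
        rw [ih f [] (cur.reverse :: acc) (by simpa using h)]
        simp [pvParts]
      · have hpre : [','].isPrefixOf (c :: rest) = false := by
          simp [List.isPrefixOf]; exact fun h' => hc h'.symm
        simp only [PySem.Chars.splitOn.go, hpre, Bool.false_eq_true, if_false]
        rw [ih f (c :: cur) acc (by simpa using Nat.le_of_succ_le_succ h)]
        simp [pvParts, hc]

theorem pv_splitOn_eq_parts (l : List Char) : PySem.Chars.splitOn l [','] = pvParts l [] := by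
  unfold PySem.Chars.splitOn
  rw [pv_go_eq_parts l (l.length + 1) [] [] (by omega)]
  simp

theorem pv_parts_append (b : List Char) : ∀ (a cur : List Char),
    pvParts (a ++ ',' :: b) cur = pvParts a cur ++ pvParts b [] := by
  intro a
  induction a with
  | nil => intro cur; simp [pvParts]
  | cons c rest ih =>
    intro cur
    by_cases hc : c = ',' <;> simp [pvParts, hc, ih]

theorem pv_parts_no_comma (a : List Char) (h : ∀ c ∈ a, c ≠ ',') :
    ∀ cur, pvParts a cur = [cur.reverse ++ a] := by
  induction a with
  | nil => intro cur; simp [pvParts]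
  | cons c rest ih =>
    intro cur
    have hc : c ≠ ',' := h c (by simp)
    rw [pvParts, if_neg hc, ih (fun x hx => h x (by simp [hx]))]
    simp

-- the filter A applies to one raw part
def pvKeep (p : List Char) : Option String :=
  let s := PySem.Str.strip (String.ofList p)
  if s ≠ "" then some s else none

theorem pv_keep_eq (p : List Char) :
    pvKeep p = if PySem.Chars.strip p ≠ [] then some (String.ofList (PySem.Chars.strip p)) else none := by
  unfold pvKeep
  rw [show PySem.Str.strip (String.ofList p) = String.ofList (PySem.Chars.strip p) from by
    simp [PySem.Str.strip]]
  by_cases h : PySem.Chars.strip p = [] <;> simp [h, ← String.toList_inj]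

theorem pv_inner_fold (ps : List (List Char)) : ∀ (out : List String),
    (ps.map String.ofList).foldl (fun out part =>
      let symbol := PySem.Str.strip part
      if symbol ≠ "" then out ++ [symbol] else out) out = out ++ ps.filterMap pvKeep := by
  induction ps with
  | nil => intro out; simp
  | cons p ps ih =>
    intro out
    simp only [List.map_cons, List.foldl_cons, List.filterMap_cons]
    rw [ih]
    unfold pvKeep
    by_cases h : PySem.Str.strip (String.ofList p) ≠ "" <;> simp [h]

-- what the state machine does on one comma-free segment
def pvEmit : List Char → List Char → List Char → List String
  | token, _pend, [] => if token ≠ [] then [String.ofList token] else []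
  | token, pend, c :: rest =>
    if PySem.Chars.isspace c then pvEmit token (if token ≠ [] then pend ++ [c] else pend) rest
    else pvEmit (token ++ pend ++ [c]) [] rest

theorem pv_rstrip_append_cons (x : List Char) (c : Char) (rest : List Char)
    (hc : PySem.Chars.isspace c = false) :
    PySem.Chars.rstrip (x ++ c :: rest) = x ++ c :: PySem.Chars.rstrip rest := by
  unfold PySem.Chars.rstrip
  rw [show (x ++ c :: rest).reverse = rest.reverse ++ c :: x.reverse from by simp]
  rw [List.dropWhile_append]
  by_cases h : (rest.reverse.dropWhile PySem.Chars.isspace).isEmpty = true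
  · rw [if_pos h, List.dropWhile_cons_of_neg (by simp [hc])]
    rw [List.isEmpty_iff] at h
    simp [h]
  · rw [if_neg h]
    simp

theorem pv_rstrip_all_space (pend : List Char) (hp : ∀ c ∈ pend, PySem.Chars.isspace c = true) :
    PySem.Chars.rstrip pend = [] := by
  unfold PySem.Chars.rstrip
  rw [List.dropWhile_eq_nil_iff.mpr (fun x hx => hp x (by simpa using hx))]
  rfl

theorem pv_emit_nonempty (p : List Char) : ∀ (token pend : List Char), token ≠ [] →
    (∀ c ∈ pend, PySem.Chars.isspace c = true) →
    pvEmit token pend p = [String.ofList (token ++ PySem.Chars.rstrip (pend ++ p))] := by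
  induction p with
  | nil =>
    intro token pend ht hp
    rw [pvEmit, if_pos ht]
    simp [pv_rstrip_all_space pend hp]
  | cons c rest ih =>
    intro token pend ht hp
    by_cases hcs : PySem.Chars.isspace c = true
    · rw [pvEmit, if_pos hcs, if_pos ht]
      rw [ih token (pend ++ [c]) ht (by
        intro x hx
        rcases List.mem_append.mp hx with h' | h'
        · exact hp x h'
        · simp at h'; subst h'; exact hcs)]
      simp
    · rw [pvEmit, if_neg hcs]
      rw [ih (token ++ pend ++ [c]) [] (by simp) (by simp)]
      rw [pv_rstrip_append_cons pend c rest (by simpa using hcs)]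
      simp

theorem pv_strip_cons_space (c : Char) (rest : List Char) (hcs : PySem.Chars.isspace c = true) :
    PySem.Chars.strip (c :: rest) = PySem.Chars.strip rest := by
  unfold PySem.Chars.strip PySem.Chars.lstrip
  rw [List.dropWhile_cons_of_pos hcs]

theorem pv_strip_cons_nonspace (c : Char) (rest : List Char)
    (hcs : PySem.Chars.isspace c = false) :
    PySem.Chars.strip (c :: rest) = c :: PySem.Chars.rstrip rest := by
  unfold PySem.Chars.strip PySem.Chars.lstrip
  rw [List.dropWhile_cons_of_neg (by simp [hcs])]
  exact pv_rstrip_append_cons [] c rest hcs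

theorem pv_emit_empty (p : List Char) : pvEmit [] [] p = (pvKeep p).toList := by
  induction p with
  | nil => simp [pvEmit, pv_keep_eq, PySem.Chars.strip, PySem.Chars.lstrip, PySem.Chars.rstrip]
  | cons c rest ih =>
    by_cases hcs : PySem.Chars.isspace c = true
    · rw [pvEmit, if_pos hcs,
        show (if ([] : List Char) ≠ [] then ([] : List Char) ++ [c] else []) = [] from by simp]
      rw [ih, pv_keep_eq, pv_keep_eq, pv_strip_cons_space c rest hcs]
    · rw [pvEmit, if_neg hcs]
      rw [show ([] : List Char) ++ [] ++ [c] = [c] from rfl]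
      rw [pv_emit_nonempty rest [c] [] (by simp) (by simp)]
      rw [pv_keep_eq, pv_strip_cons_nonspace c rest (by simpa using hcs)]
      simp

theorem pv_chunk_no_comma (a : List Char) (h : ∀ c ∈ a, c ≠ ',') :
    ∀ (token pend : List Char) (out : List String),
    altChunk a token pend out = out ++ pvEmit token pend a := by
  induction a with
  | nil =>
    intro token pend out
    rw [altChunk, pvEmit]
    by_cases ht : token ≠ [] <;> simp [ht]
  | cons c rest ih =>
    intro token pend out
    have hc : c ≠ ',' := h c (by simp)
    rw [altChunk, if_neg hc, pvEmit]
    by_cases hcs : PySem.Chars.isspace c = true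
    · rw [if_pos hcs, if_pos hcs, ih (fun x hx => h x (by simp [hx]))]
    · rw [if_neg hcs, if_neg hcs, ih (fun x hx => h x (by simp [hx]))]

theorem pv_chunk_split (a : List Char) (h : ∀ c ∈ a, c ≠ ',') (b : List Char) :
    ∀ (token pend : List Char) (out : List String),
    altChunk (a ++ ',' :: b) token pend out = altChunk b [] [] (out ++ pvEmit token pend a) := by
  induction a with
  | nil =>
    intro token pend out
    rw [List.nil_append, altChunk, if_pos rfl, pvEmit]
    by_cases ht : token ≠ [] <;> simp [ht]
  | cons c rest ih =>
    intro token pend out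
    have hc : c ≠ ',' := h c (by simp)
    rw [List.cons_append, altChunk, if_neg hc, pvEmit]
    by_cases hcs : PySem.Chars.isspace c = true
    · rw [if_pos hcs, if_pos hcs, ih (fun x hx => h x (by simp [hx]))]
    · rw [if_neg hcs, if_neg hcs, ih (fun x hx => h x (by simp [hx]))]

theorem pv_chunk_eq_fuel : ∀ (n : Nat) (l : List Char), l.length ≤ n →
    ∀ (out : List String), altChunk l [] [] out = out ++ (pvParts l []).filterMap pvKeep := by
  intro n
  induction n with
  | zero =>
    intro l hl out
    have : l = [] := List.length_eq_zero_iff.mp (Nat.le_zero.mp hl)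
    subst this
    rw [pv_chunk_no_comma [] (by simp)]
    simp [pvParts, pvEmit, show pvKeep [] = none from by decide]
  | succ n ihn =>
    intro l hl out
    by_cases hc : ',' ∈ l
    · have hd : l.dropWhile (fun c => c != ',') ≠ [] := by
        rw [Ne, List.dropWhile_eq_nil_iff]
        push Not
        exact ⟨',', hc, by simp⟩
      obtain ⟨hdc, tl, hdt⟩ := List.exists_cons_of_ne_nil hd
      have hhd : hdc = ',' := by
        have h2 := List.head_dropWhile_not (fun c => c != ',') hd
        simp only [hdt, List.head_cons] at h2
        simpa using h2
      have hsplit : l = l.takeWhile (fun c => c != ',') ++ ',' :: tl := by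
        conv_lhs => rw [← List.takeWhile_append_dropWhile (p := fun c => c != ',') (l := l)]
        rw [hdt, hhd]
      have ha : ∀ c ∈ l.takeWhile (fun c => c != ','), c ≠ ',' := by
        intro c hca
        have := List.mem_takeWhile_imp hca
        simpa using this
      have hlen : tl.length ≤ n := by
        have h3 := congrArg List.length hsplit
        simp at h3
        omega
      rw [hsplit, pv_chunk_split _ ha tl, ihn tl hlen, pv_parts_append,
        pv_parts_no_comma _ ha, pv_emit_empty]
      simp only [List.filterMap_cons, List.filterMap_append]
      cases hk : pvKeep (l.takeWhile (fun c => c != ',')) <;> simp [hk]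
    · have h' : ∀ c ∈ l, c ≠ ',' := fun c hcl he => hc (he ▸ hcl)
      rw [pv_chunk_no_comma l h', pv_parts_no_comma l h', pv_emit_empty]
      simp [List.filterMap_cons]
      cases pvKeep l <;> simp

theorem pv_A_main (chunks : List String) : ∀ (out : List String),
    chunks.foldl (fun out chunk =>
      ((PySem.Chars.splitOn chunk.toList ",".toList).map String.ofList).foldl (fun out part =>
        let symbol := PySem.Str.strip part
        if symbol ≠ "" then out ++ [symbol] else out) out) out
    = out ++ chunks.flatMap (fun c => (pvParts c.toList []).filterMap pvKeep) := by
  induction chunks with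
  | nil => intro out; simp
  | cons c rest ih =>
    intro out
    simp only [List.foldl_cons, List.flatMap_cons]
    rw [ih, show (",".toList) = [','] from rfl, pv_splitOn_eq_parts, pv_inner_fold,
      List.append_assoc]

theorem pv_B_main (chunks : List String) : ∀ (out : List String),
    chunks.foldl (fun out chunk => altChunk chunk.toList [] [] out) out
    = out ++ chunks.flatMap (fun c => (pvParts c.toList []).filterMap pvKeep) := by
  induction chunks with
  | nil => intro out; simp
  | cons c rest ih =>
    intro out
    simp only [List.foldl_cons, List.flatMap_cons]
    rw [ih, pv_chunk_eq_fuel c.toList.length c.toList le_rfl, List.append_assoc]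

-- ===== VERDICT (by name: the statement is the Claim_ definition above) =====
theorem split_symbols_py_spec : Claim_equal_split_symbols_py := by
  intro chunks _
  unfold Spec_split_symbols_py split_symbols_py split_symbols_py_alt
  rw [pv_A_main, pv_B_main]
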